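/- GENERATED by farm/worked/mk_tree_copies.py from farm/worked/compute_sorted_huffman.COMPOSITION/Proof.lean (a worked proof of the farm's unit `compute_sorted_huffman.COMPOSITION`,
   accepted by the verdict) — do not edit. -/
import Vorbis.Spec.Units.compute_sorted_huffman_COMPOSITION

/-
  THE COMPOSITION OF compute_sorted_huffman: the four segment statements give the function's contract. Pure chaining, a straight
  line .1 → .2 → .3 → .4: each segment's exit assertion IS the next one's entry assertion, and segment .4 ends in the contract's
  `Returned`. No edge of the assertion graph goes backwards: no induction is needed.
-/
namespace Vorbis.Spec.Worked.compute_sorted_huffman_COMPOSITION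
open Vorbis.Spec.compute_sorted_huffman_COMPOSITION (Statement)
open X86 X86.User Asan Vorbis Vorbis.Spec

/-- **THE COMPOSITION**: the statement of the unit, by `ReachVia.trans` alone. -/
theorem compute_sorted_huffman_composes_w : Statement := by
  intro Lay _ μ _ u₀ h1 h2 h3 h4 others frames Blk e ret he hpre
  refine (h1 others frames Blk ret e he hpre).trans ?_
  intro v hv
  refine (h2 others frames Blk ret e v hv).trans ?_
  intro w hw
  refine (h3 others frames Blk ret e w hw).trans ?_
  intro x hx
  exact h4 others frames Blk ret e x hx

end Vorbis.Spec.Worked.compute_sorted_huffman_COMPOSITION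

theorem Vorbis.Spec.Worked.compute_sorted_huffman_COMPOSITION_ok : Vorbis.Spec.compute_sorted_huffman_COMPOSITION.Statement :=
  Vorbis.Spec.Worked.compute_sorted_huffman_COMPOSITION.compute_sorted_huffman_composes_w
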